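-- pv_equiv track=rewrite | github.com/PortsMaster/PortMaster-GUI | theme_msgfmt.py | dump_tr_string
-- ===== SOURCE A (Python) =====
-- def dump_tr_string(string):
--     if "\\n" in string:
--         result = ['""']
--         items = string.split("\\n")
--         for line in items[:-1]:
--             result.append(f'"{line}\\n"')
--         result.append(f'"{items[-1]}"')
--         return "\n".join(result)
--
--     return f'"{string}"'
-- ===== SOURCE B (Python) =====
-- def dump_tr_string(string):
--     if "\\n" in string:
--         return '""\n"' + string.replace("\\n", '\\n"\n"') + '"'
--     return f'"{string}"'
-- ===== Notes on version B (the rewrite author's own statement) =====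
-- stated objective: idiomatic
-- what changed: The split-into-list-and-loop branch is replaced by a single str.replace rewrite that turns each escaped newline into close-quote/newline/open-quote, with the leading empty-string line and the outer quotes added once.
import Mathlib
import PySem

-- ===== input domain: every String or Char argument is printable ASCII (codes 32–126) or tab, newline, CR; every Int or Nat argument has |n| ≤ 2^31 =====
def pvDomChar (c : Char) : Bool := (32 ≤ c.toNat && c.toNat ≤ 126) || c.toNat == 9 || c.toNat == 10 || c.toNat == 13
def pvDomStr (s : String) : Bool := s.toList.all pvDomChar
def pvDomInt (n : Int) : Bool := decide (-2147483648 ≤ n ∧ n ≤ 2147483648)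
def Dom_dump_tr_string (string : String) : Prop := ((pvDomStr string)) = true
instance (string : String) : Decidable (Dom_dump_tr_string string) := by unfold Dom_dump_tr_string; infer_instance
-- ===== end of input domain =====

-- B replaces A's split-into-list-and-append-loop branch by a single str.replace rewrite (idiomatic; return values proved equal).

-- ===== PORT A =====
def dump_tr_string (string : String) : String :=
  if PySem.Str.isIn "\\n" string then
    -- items = string.split("\\n"); the separator is the nonempty literal "\\n", so split? is always some (getD [] is exact)
    let items : List String := (PySem.Str.split? string "\\n").getD []
    -- result = ['""'], then the append loop over items[:-1], then the final append of f'"{items[-1]}"'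
    -- (items from split is nonempty, so items[-1] never raises; getD "" is exact)
    let result : List String :=
      ["\"\""]
        ++ (PySem.List.slice items none (some (-1))).map (fun line => "\"" ++ line ++ "\\n\"")
        ++ ["\"" ++ (PySem.List.pyGet? items (-1)).getD "" ++ "\""]
    PySem.Str.join "\n" result
  else
    "\"" ++ string ++ "\""

-- ===== PORT B =====
def dump_tr_string_alt (string : String) : String :=
  if PySem.Str.isIn "\\n" string then
    "\"\"\n\"" ++ PySem.Str.replace string "\\n" "\\n\"\n\"" ++ "\""
  else
    "\"" ++ string ++ "\""

-- ===== PRECONDITION & SPEC =====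
def Spec_dump_tr_string (string : String) (out : String) : Prop := out = dump_tr_string_alt string
instance (string : String) (out : String) : Decidable (Spec_dump_tr_string string out) := by unfold Spec_dump_tr_string; infer_instance

-- ===== CLAIM (what is proved, stated in full; the proofs are below) =====
def Claim_equal_dump_tr_string : Prop := ∀ (string : String), Dom_dump_tr_string string → Spec_dump_tr_string string (dump_tr_string string)

-- ===== LEMMAS AND PROOFS =====

-- Reference splitter: the segments of l between occurrences of the two-char separator backslash-'n', leftmost-first.
def pvSegs (l : List Char) : List (List Char) :=
  match l with
  | [] => [[]]
  | c :: t =>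
    if c = '\\' ∧ t.head? = some 'n' then [] :: pvSegs t.tail
    else (pvSegs t).modifyHead (c :: ·)
termination_by l.length
decreasing_by
  · simp only [List.length_cons]
    cases t <;> simp
  · simp

theorem pvSegs_nil : pvSegs [] = [[]] := by
  rw [pvSegs]

theorem pvSegs_sep (t : List Char) : pvSegs ('\\' :: 'n' :: t) = [] :: pvSegs t := by
  rw [pvSegs]; simp

theorem pvSegs_other (c : Char) (t : List Char) (h : ¬ (c = '\\' ∧ t.head? = some 'n')) :
    pvSegs (c :: t) = (pvSegs t).modifyHead (c :: ·) := by
  rw [pvSegs]; simp [h]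

theorem pvSegs_ne_nil (l : List Char) : pvSegs l ≠ [] := by
  fun_induction pvSegs l with
  | case1 => simp
  | case2 c t h ih => simp
  | case3 c t h ih =>
    obtain ⟨a, as, ha⟩ := List.exists_cons_of_ne_nil ih
    simp [ha]

theorem pvIsPrefixOf_false (c : Char) (t : List Char) (hc : ¬ (c = '\\' ∧ t.head? = some 'n')) :
    (['\\', 'n'] : List Char).isPrefixOf (c :: t) = false := by
  cases t with
  | nil => simp [List.isPrefixOf]
  | cons c2 t2 =>
    simp only [List.head?_cons, Option.some.injEq, not_and] at hc
    simp [List.isPrefixOf]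
    intro h2 h3
    exact hc h2.symm h3.symm

theorem splitOn_go_eq (fuel : Nat) : ∀ (l cur : List Char) (acc : List (List Char)),
    l.length < fuel →
    PySem.Chars.splitOn.go ['\\', 'n'] fuel l cur acc
      = acc.reverse ++ (pvSegs l).modifyHead (fun seg => cur.reverse ++ seg) := by
  induction fuel with
  | zero => intro l cur acc h; omega
  | succ f ih =>
    intro l cur acc h
    match l with
    | [] => simp [PySem.Chars.splitOn.go, pvSegs_nil]
    | c :: t =>
      by_cases hc : c = '\\' ∧ t.head? = some 'n'
      · obtain ⟨hc1, hc2⟩ := hc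
        subst hc1
        cases t with
        | nil => simp at hc2
        | cons c2 t2 =>
          simp only [List.head?_cons, Option.some.injEq] at hc2
          subst hc2
          have hstep : PySem.Chars.splitOn.go ['\\', 'n'] (f + 1) ('\\' :: 'n' :: t2) cur acc
              = PySem.Chars.splitOn.go ['\\', 'n'] f t2 [] (cur.reverse :: acc) := by
            simp [PySem.Chars.splitOn.go, List.isPrefixOf]
          rw [hstep, ih t2 [] (cur.reverse :: acc) (by simp at h; omega), pvSegs_sep]
          obtain ⟨a, as, ha⟩ := List.exists_cons_of_ne_nil (pvSegs_ne_nil t2)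
          simp [ha]
      · have hpre := pvIsPrefixOf_false c t hc
        have hstep : PySem.Chars.splitOn.go ['\\', 'n'] (f + 1) (c :: t) cur acc
            = PySem.Chars.splitOn.go ['\\', 'n'] f t (c :: cur) acc := by
          simp [PySem.Chars.splitOn.go, hpre]
        rw [hstep, ih t (c :: cur) acc (by simp at h; omega), pvSegs_other c t hc]
        obtain ⟨a, as, ha⟩ := List.exists_cons_of_ne_nil (pvSegs_ne_nil t)
        simp [ha]

theorem splitOn_eq (l : List Char) : PySem.Chars.splitOn l ['\\', 'n'] = pvSegs l := by
  rw [PySem.Chars.splitOn, splitOn_go_eq (l.length + 1) l [] [] (by omega)]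
  obtain ⟨a, as, ha⟩ := List.exists_cons_of_ne_nil (pvSegs_ne_nil l)
  simp [ha]

theorem join_modifyHead_cons (sep : List Char) (c : Char) (xs : List (List Char)) (h : xs ≠ []) :
    PySem.Chars.join sep (xs.modifyHead (c :: ·)) = c :: PySem.Chars.join sep xs := by
  obtain ⟨a, as, ha⟩ := List.exists_cons_of_ne_nil h
  subst ha
  cases as with
  | nil => simp [PySem.Chars.join_singleton]
  | cons b bs => simp [PySem.Chars.join_cons_cons]

theorem replace_go_eq (fuel : Nat) : ∀ (l acc : List Char),
    l.length ≤ fuel →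
    PySem.Chars.replace.go ['\\', 'n'] ['\\', 'n', '"', '\n', '"'] fuel l acc
      = acc.reverse ++ PySem.Chars.join ['\\', 'n', '"', '\n', '"'] (pvSegs l) := by
  induction fuel with
  | zero =>
    intro l acc h
    have hl : l = [] := by
      cases l with
      | nil => rfl
      | cons a as => simp at h
    subst hl
    simp [PySem.Chars.replace.go, pvSegs_nil, PySem.Chars.join_singleton]
  | succ f ih =>
    intro l acc h
    match l with
    | [] => simp [PySem.Chars.replace.go, pvSegs_nil, PySem.Chars.join_singleton]
    | c :: t =>
      by_cases hc : c = '\\' ∧ t.head? = some 'n'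
      · obtain ⟨hc1, hc2⟩ := hc
        subst hc1
        cases t with
        | nil => simp at hc2
        | cons c2 t2 =>
          simp only [List.head?_cons, Option.some.injEq] at hc2
          subst hc2
          have hstep : PySem.Chars.replace.go ['\\', 'n'] ['\\', 'n', '"', '\n', '"'] (f + 1) ('\\' :: 'n' :: t2) acc
              = PySem.Chars.replace.go ['\\', 'n'] ['\\', 'n', '"', '\n', '"'] f t2
                  (('\\' :: 'n' :: '"' :: '\n' :: '"' :: []).reverse ++ acc) := by
            simp [PySem.Chars.replace.go, List.isPrefixOf]
          rw [hstep, ih t2 _ (by simp at h; omega), pvSegs_sep]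
          obtain ⟨a, as, ha⟩ := List.exists_cons_of_ne_nil (pvSegs_ne_nil t2)
          simp [ha, PySem.Chars.join_cons_cons]
      · have hpre := pvIsPrefixOf_false c t hc
        have hstep : PySem.Chars.replace.go ['\\', 'n'] ['\\', 'n', '"', '\n', '"'] (f + 1) (c :: t) acc
            = PySem.Chars.replace.go ['\\', 'n'] ['\\', 'n', '"', '\n', '"'] f t (c :: acc) := by
          simp [PySem.Chars.replace.go, hpre]
        rw [hstep, ih t (c :: acc) (by simp at h; omega), pvSegs_other c t hc,
          join_modifyHead_cons _ c _ (pvSegs_ne_nil t)]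
        simp

theorem replace_eq (l : List Char) :
    PySem.Chars.replace l ['\\', 'n'] ['\\', 'n', '"', '\n', '"']
      = PySem.Chars.join ['\\', 'n', '"', '\n', '"'] (pvSegs l) := by
  rw [PySem.Chars.replace, if_neg (by simp)]
  have h := replace_go_eq l.length l [] (by omega)
  simpa using h

theorem join_cons_of_ne_nil (sep a : List Char) (xs : List (List Char)) (h : xs ≠ []) :
    PySem.Chars.join sep (a :: xs) = a ++ sep ++ PySem.Chars.join sep xs := by
  obtain ⟨b, bs, hb⟩ := List.exists_cons_of_ne_nil h
  rw [hb, PySem.Chars.join_cons_cons]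

theorem joinH (parts : List (List Char)) : ∀ (x z : List Char), (x :: parts).getLast? = some z →
    PySem.Chars.join ['\n']
      ((x :: parts).dropLast.map (fun seg => '"' :: (seg ++ ['\\', 'n', '"'])) ++ ['"' :: (z ++ ['"'])])
      = '"' :: (PySem.Chars.join ['\\', 'n', '"', '\n', '"'] (x :: parts) ++ ['"']) := by
  induction parts with
  | nil =>
    intro x z hz
    simp only [List.getLast?_singleton, Option.some.injEq] at hz
    subst hz
    simp [PySem.Chars.join_singleton]
  | cons y rest ih =>
    intro x z hz
    have hz' : (y :: rest).getLast? = some z := by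
      rw [← hz]; simp [List.getLast?_cons_cons]
    have hne : (y :: rest).dropLast.map (fun seg => '"' :: (seg ++ ['\\', 'n', '"'])) ++ [('"' :: (z ++ ['"']))] ≠ [] := by simp
    obtain ⟨a, as, ha⟩ := List.exists_cons_of_ne_nil hne
    rw [List.dropLast_cons₂, List.map_cons, List.cons_append, ha, PySem.Chars.join_cons_cons, ← ha,
      ih y z hz', PySem.Chars.join_cons_cons]
    simp

theorem dump_tr_string_spec : Claim_equal_dump_tr_string := by
  intro s _
  unfold Spec_dump_tr_string dump_tr_string dump_tr_string_alt
  have hsep : ("\\n" : String).toList = ['\\', 'n'] := by decide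
  by_cases h : PySem.Str.isIn "\\n" s = true
  · rw [if_pos h, if_pos h]
    have hsplit : (PySem.Str.split? s "\\n").getD [] = (pvSegs s.toList).map String.ofList := by
      simp [PySem.Str.split?, PySem.Chars.split?, hsep, splitOn_eq]
    obtain ⟨x, parts, hx⟩ := List.exists_cons_of_ne_nil (pvSegs_ne_nil s.toList)
    cases hz : (x :: parts).getLast? with
    | none => simp at hz
    | some z =>
      apply String.toList_inj.mp
      have hq : ("\"" : String).toList = ['"'] := by decide
      have hqq : ("\"\"" : String).toList = ['"', '"'] := by decide
      have hnl : ("\n" : String).toList = ['\n'] := by decide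
      have hbsnq : ("\\n\"" : String).toList = ['\\', 'n', '"'] := by decide
      have hB1 : ("\"\"\n\"" : String).toList = ['"', '"', '\n', '"'] := by decide
      have hrepl : ("\\n\"\n\"" : String).toList = ['\\', 'n', '"', '\n', '"'] := by decide
      have hlast : ((String.ofList x :: List.map String.ofList parts).getLast?.getD "").toList = z := by
        rw [← List.map_cons, List.getLast?_map, hz]
        simp
      rw [PySem.Str.toList_join, String.toList_append, String.toList_append,
        PySem.Str.toList_replace, hsep, hrepl, hB1, hq, replace_eq, hx]
      have hJ := joinH parts x z hz
      simp only [hsplit, hx, PySem.List.slice_to_neg_one, PySem.List.pyGet?_neg_one, hlast,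
        List.map_map, List.map_cons, List.map_append, List.map_dropLast, String.toList_append,
        hq, hqq, hnl, hbsnq, String.toList_ofList, Function.comp_def, List.map_nil,
        List.cons_append, List.nil_append] at hJ ⊢
      rw [join_cons_of_ne_nil _ _ _ (by simp), hJ]
      simp
  · rw [if_neg h, if_neg h]
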